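-- pv_equiv track=rewrite | github.com/havogt/icon4py | scripts/field_dependencies.py | _get_transitive_dependents
-- ===== SOURCE A (Python) =====
-- from collections import defaultdict
--
-- def _build_reverse_graph(graph: dict[str, set[str]]) -> dict[str, set[str]]:
--     """Build a reverse graph: {field: set of fields that directly depend on it}."""
--     reverse: dict[str, set[str]] = defaultdict(set)
--     for field, deps in graph.items():
--         for dep in deps:
--             reverse[dep].add(field)
--     return dict(reverse)
--
-- def _get_transitive_dependents(field: str, graph: dict[str, set[str]]) -> set[str]:
--     """Get all fields that transitively depend on this field."""
--     reverse = _build_reverse_graph(graph)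
--     visited: set[str] = set()
--     stack = [field]
--     while stack:
--         current = stack.pop()
--         if current in visited:
--             continue
--         visited.add(current)
--         for dependent in reverse.get(current, set()):
--             if dependent not in visited:
--                 stack.append(dependent)
--     visited.discard(field)
--     return visited
-- ===== SOURCE B (Python) =====
-- def _get_transitive_dependents(field: str, graph: dict[str, set[str]]) -> set[str]:
--     """Get all fields that transitively depend on this field.
--
--     Forward-fixpoint formulation: no reverse graph; repeatedly scan the
--     forward edges, adding every field whose deps touch the reachable set,
--     until a full pass adds nothing.
--     """
--     reachable = {field}
--     changed = True
--     while changed: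
--         changed = False
--         for f, deps in graph.items():
--             if f not in reachable and any(d in reachable for d in deps):
--                 reachable.add(f)
--                 changed = True
--     return reachable - {field}
-- ===== Notes on version B (the rewrite author's own statement) =====
-- stated objective: simpler
-- what changed: Replaces A's build-a-reverse-graph-then-DFS-with-an-explicit-stack by a direct fixpoint over the forward graph: repeatedly scan the (field, deps) pairs and add every field whose deps intersect the reachable set until a pass adds nothing, then subtract the source field; this skips building the reverse index and its per-node set objects, which a timing run measured as a constant-factor speedup.
import Mathlib
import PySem

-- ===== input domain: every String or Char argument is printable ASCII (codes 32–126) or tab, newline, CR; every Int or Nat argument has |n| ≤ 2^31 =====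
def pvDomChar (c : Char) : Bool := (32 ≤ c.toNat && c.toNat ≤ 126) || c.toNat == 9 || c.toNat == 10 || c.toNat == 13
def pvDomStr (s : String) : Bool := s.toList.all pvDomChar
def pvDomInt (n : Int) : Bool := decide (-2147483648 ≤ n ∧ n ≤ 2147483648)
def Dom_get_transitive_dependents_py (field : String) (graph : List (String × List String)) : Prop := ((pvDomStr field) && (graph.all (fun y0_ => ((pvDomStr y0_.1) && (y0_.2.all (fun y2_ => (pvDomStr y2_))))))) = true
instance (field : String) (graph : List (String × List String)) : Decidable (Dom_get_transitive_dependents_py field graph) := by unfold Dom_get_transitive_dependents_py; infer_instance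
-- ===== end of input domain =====

-- B replaces A's reverse-graph construction + explicit-stack DFS by a forward fixpoint over
-- the original graph (rescan edges until no new dependent appears); same returned set.
-- Both Pythons return a SET; its iteration order is not modelled (PySem.Set), so both
-- ports return the canonical sorted representative of that set.


-- ===== PORT A =====
-- _build_reverse_graph: reverse[dep].add(field) for every (field, deps) item, dep in deps
def pvBuildReverse (graph : List (String × List String)) : PySem.Dict String (PySem.Set String) :=
  graph.foldl
    (fun rev fd =>
      fd.2.foldl
        (fun rev dep => rev.insert dep (PySem.Set.add (rev.getD dep PySem.Set.empty) fd.1))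
        rev)
    PySem.Dict.empty

-- the 'while stack:' loop of A; fuel is a proven-sufficient bound on the number of iterations
-- (stack is head-is-top, so 'dep :: st' is stack.append and matching on the head is stack.pop())
def pvDfs (rev : PySem.Dict String (PySem.Set String)) :
    Nat → PySem.Set String → List String → PySem.Set String
  | 0, visited, _ => visited
  | _ + 1, visited, [] => visited
  | fuel + 1, visited, current :: stack =>
      if current ∈ visited then pvDfs rev fuel visited stack
      else
        let visited' := PySem.Set.add visited current
        pvDfs rev fuel visited'
          ((rev.getD current PySem.Set.empty).foldl
            (fun st dep => if dep ∈ visited' then st else dep :: st) stack)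

def get_transitive_dependents_py (field : String) (graph : List (String × List String)) : List String :=
  let rev := pvBuildReverse graph
  -- fuel: (|U|+1)^2 where U are the possible stack elements (field and the graph's keys);
  -- proven sufficient for the while loop below
  let U := PySem.Set.ofList (field :: graph.map Prod.fst)
  let visited := pvDfs rev ((U.length + 1) * (U.length + 1)) PySem.Set.empty [field]
  -- visited.discard(field); return visited  (canonical sorted representative of the set)
  PySem.List.sorted (PySem.Set.discard visited field) (fun x => x) false

-- ===== PORT B =====
-- one 'for f, deps in graph.items():' pass; accumulator is (reachable, changed)
def pvPass (graph : List (String × List String)) (r : PySem.Set String) :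
    PySem.Set String × Bool :=
  graph.foldl
    (fun acc fd =>
      if !PySem.Set.contains acc.1 fd.1 && fd.2.any (fun d => PySem.Set.contains acc.1 d) then
        (PySem.Set.add acc.1 fd.1, true)
      else acc)
    (r, false)

-- the 'while changed:' loop; fuel is a proven-sufficient bound on the number of passes
def pvFix (graph : List (String × List String)) : Nat → PySem.Set String → PySem.Set String
  | 0, r => r
  | fuel + 1, r =>
      let p := pvPass graph r
      if p.2 then pvFix graph fuel p.1 else p.1

def get_transitive_dependents_py_alt (field : String) (graph : List (String × List String)) : List String :=
  let reachable := pvFix graph (graph.length + 1) (PySem.Set.ofList [field])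
  -- return reachable - {field}  (canonical sorted representative of the set)
  PySem.List.sorted (PySem.Set.diff reachable (PySem.Set.ofList [field])) (fun x => x) false

-- ===== PRECONDITION & SPEC =====
def Spec_get_transitive_dependents_py (field : String) (graph : List (String × List String)) (out : List String) : Prop := out = get_transitive_dependents_py_alt field graph
instance (field : String) (graph : List (String × List String)) (out : List String) : Decidable (Spec_get_transitive_dependents_py field graph out) := by unfold Spec_get_transitive_dependents_py; infer_instance

-- ===== CLAIM (what is proved, stated in full; the proofs are below) =====
def Claim_equal_get_transitive_dependents_py : Prop := ∀ (field : String) (graph : List (String × List String)), Dom_get_transitive_dependents_py field graph → Spec_get_transitive_dependents_py field graph (get_transitive_dependents_py field graph)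

-- ===== LEMMAS AND PROOFS =====

-- x transitively reaches field through reversed dependency edges (i.e. x is field itself or a
-- field that transitively depends on it): the common specification of both loops
inductive pvReach (graph : List (String × List String)) (field : String) : String → Prop
  | base : pvReach graph field field
  | step {x f deps} : pvReach graph field x → (f, deps) ∈ graph → x ∈ deps →
      pvReach graph field f

-- a Nodup list is no longer than any list containing it
theorem pvNodupSubsetLen (l1 l2 : List String) (h : l1.Nodup) (hs : ∀ x ∈ l1, x ∈ l2) :
    l1.length ≤ l2.length := by
  calc l1.length = l1.toFinset.card := (List.toFinset_card_of_nodup h).symm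
    _ ≤ l2.toFinset.card := Finset.card_le_card (by intro a ha; simp at ha ⊢; exact hs a ha)
    _ ≤ l2.length := l2.toFinset_card_le

-- the inner loop of pvBuildReverse, as one dict update
theorem pvInnerGetD (f : String) (deps : List String) (d : PySem.Dict String (PySem.Set String))
    (x : String) :
    (deps.foldl (fun rev dep => rev.insert dep (PySem.Set.add (rev.getD dep PySem.Set.empty) f)) d).getD x PySem.Set.empty
      = if x ∈ deps then PySem.Set.add (d.getD x PySem.Set.empty) f else d.getD x PySem.Set.empty := by
  induction deps generalizing d with
  | nil => simp
  | cons hd tl ih =>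
    simp only [List.foldl_cons, ih, List.mem_cons]
    rw [PySem.Dict.getD_insert]
    by_cases hx : x ∈ tl
    · by_cases he : x = hd <;> simp [hx, he]
    · by_cases he : x = hd <;> simp [hx, he]

-- membership in the reverse graph = a forward edge of the input
theorem pvRevGetD (graph : List (String × List String)) (d : PySem.Dict String (PySem.Set String))
    (x y : String) :
    (y ∈ (graph.foldl (fun rev fd => fd.2.foldl (fun rev dep => rev.insert dep (PySem.Set.add (rev.getD dep PySem.Set.empty) fd.1)) rev) d).getD x PySem.Set.empty)
      ↔ (y ∈ d.getD x PySem.Set.empty ∨ ∃ deps, (y, deps) ∈ graph ∧ x ∈ deps) := by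
  induction graph generalizing d with
  | nil => simp
  | cons hd tl ih =>
    simp only [List.foldl_cons, ih, pvInnerGetD, List.mem_cons]
    by_cases hx : x ∈ hd.2
    · simp only [hx, if_pos, PySem.Set.mem_add]
      constructor
      · rintro ((h | rfl) | h)
        · exact Or.inl h
        · exact Or.inr ⟨hd.2, Or.inl rfl, hx⟩
        · exact Or.inr (by obtain ⟨deps, hm, hxm⟩ := h; exact ⟨deps, Or.inr hm, hxm⟩)
      · rintro (h | ⟨deps, (heq | hm), hxm⟩)
        · exact Or.inl (Or.inl h)
        · exact Or.inl (Or.inr (by cases hd; cases heq; rfl))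
        · exact Or.inr ⟨deps, hm, hxm⟩
    · simp only [hx, if_neg, not_false_iff]
      constructor
      · rintro (h | ⟨deps, hm, hxm⟩)
        · exact Or.inl h
        · exact Or.inr ⟨deps, Or.inr hm, hxm⟩
      · rintro (h | ⟨deps, (heq | hm), hxm⟩)
        · exact Or.inl h
        · exact absurd (by cases hd; cases heq; exact hxm) hx
        · exact Or.inr ⟨deps, hm, hxm⟩

theorem pvRevNodup (graph : List (String × List String)) (d : PySem.Dict String (PySem.Set String))
    (hd0 : ∀ x, (d.getD x PySem.Set.empty).Nodup) (x : String) :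
    ((graph.foldl (fun rev fd => fd.2.foldl (fun rev dep => rev.insert dep (PySem.Set.add (rev.getD dep PySem.Set.empty) fd.1)) rev) d).getD x PySem.Set.empty).Nodup := by
  induction graph generalizing d with
  | nil => exact hd0 x
  | cons hd tl ih =>
    refine ih _ (fun z => ?_)
    rw [pvInnerGetD]
    split
    · exact PySem.Set.nodup_add _ _ (hd0 z)
    · exact hd0 z

-- the stack-push loop of pvDfs is a reversed filter
theorem pvPushEq (v' : PySem.Set String) (deps rest : List String) :
    deps.foldl (fun st dep => if dep ∈ v' then st else dep :: st) rest
      = (deps.filter (fun d => !decide (d ∈ v'))).reverse ++ rest := by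
  induction deps generalizing rest with
  | nil => simp
  | cons hd tl ih =>
    by_cases h : hd ∈ v' <;> simp [h, ih]

theorem pvMemPush (v' : PySem.Set String) (deps rest : List String) (x : String) :
    x ∈ deps.foldl (fun st dep => if dep ∈ v' then st else dep :: st) rest
      ↔ (x ∈ deps ∧ x ∉ v') ∨ x ∈ rest := by
  rw [pvPushEq]; simp [List.mem_filter, and_comm]

theorem pvLenPush (v' : PySem.Set String) (deps rest : List String) :
    (deps.foldl (fun st dep => if dep ∈ v' then st else dep :: st) rest).length
      ≤ deps.length + rest.length := by
  rw [pvPushEq]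
  simp only [List.length_append, List.length_reverse]
  have := List.length_filter_le (fun d => !decide (d ∈ v')) deps
  omega

-- invariants of A's while loop: the final visited set is Nodup, absorbs visited and stack,
-- is sound for any reverse-edge-closed predicate P, and is closed under reverse edges
theorem pvDfs_master (rev : PySem.Dict String (PySem.Set String)) (U : List String)
    (hrevU : ∀ x y, y ∈ rev.getD x PySem.Set.empty → y ∈ U)
    (hrevN : ∀ x, (rev.getD x PySem.Set.empty).Nodup)
    (P : String → Prop)
    (hclosed : ∀ c w, P c → w ∈ rev.getD c PySem.Set.empty → P w) :
    ∀ (fuel : Nat) (visited : PySem.Set String) (stack : List String),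
      visited.Nodup → (∀ v ∈ visited, v ∈ U) → (∀ s ∈ stack, s ∈ U) →
      (∀ v ∈ visited, P v) → (∀ s ∈ stack, P s) →
      (∀ v ∈ visited, ∀ w ∈ rev.getD v PySem.Set.empty, w ∈ visited ∨ w ∈ stack) →
      (U.length - visited.length) * (U.length + 1) + stack.length ≤ fuel →
      (pvDfs rev fuel visited stack).Nodup ∧
      (∀ x, x ∈ visited ∨ x ∈ stack → x ∈ pvDfs rev fuel visited stack) ∧
      (∀ x ∈ pvDfs rev fuel visited stack, P x) ∧
      (∀ v ∈ pvDfs rev fuel visited stack, ∀ w ∈ rev.getD v PySem.Set.empty,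
        w ∈ pvDfs rev fuel visited stack) := by
  intro fuel
  induction fuel with
  | zero =>
    intro visited stack hN hVU hSU hPV hPS hI3 hM
    have hst : stack = [] := by
      have := List.length_eq_zero_iff.mp (by omega : stack.length = 0)
      exact this
    subst hst
    refine ⟨hN, ?_, hPV, ?_⟩
    · rintro x (h | h)
      · exact h
      · simp at h
    · intro v hv w hw
      rcases hI3 v hv w hw with h | h
      · exact h
      · simp at h
  | succ n ih =>
    intro visited stack hN hVU hSU hPV hPS hI3 hM
    match stack with
    | [] =>
      refine ⟨hN, ?_, hPV, ?_⟩
      · rintro x (h | h)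
        · exact h
        · simp at h
      · intro v hv w hw
        rcases hI3 v hv w hw with h | h
        · exact h
        · simp at h
    | current :: rest =>
      by_cases hc : current ∈ visited
      · rw [show pvDfs rev (n+1) visited (current :: rest)
              = pvDfs rev n visited rest by simp [pvDfs, hc]]
        set m := (U.length - visited.length) * (U.length + 1) with hm
        have h := ih visited rest hN hVU (fun s hs => hSU s (List.mem_cons_of_mem _ hs))
          hPV (fun s hs => hPS s (List.mem_cons_of_mem _ hs))
          (fun v hv w hw => by
            rcases hI3 v hv w hw with h | h
            · exact Or.inl h
            · rcases List.mem_cons.mp h with rfl | h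
              · exact Or.inl hc
              · exact Or.inr h)
          (by simp only [List.length_cons] at hM; omega)
        refine ⟨h.1, ?_, h.2.2.1, h.2.2.2⟩
        rintro x (hx | hx)
        · exact h.2.1 x (Or.inl hx)
        · rcases List.mem_cons.mp hx with rfl | hx
          · exact h.2.1 x (Or.inl hc)
          · exact h.2.1 x (Or.inr hx)
      · -- visit current
        have hcU : current ∈ U := hSU current List.mem_cons_self
        have hPc : P current := hPS current List.mem_cons_self
        have hstep : pvDfs rev (n+1) visited (current :: rest)
            = pvDfs rev n (PySem.Set.add visited current)
                ((rev.getD current PySem.Set.empty).foldl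
                  (fun st dep => if dep ∈ PySem.Set.add visited current then st else dep :: st)
                  rest) := by
          simp only [pvDfs]
          rw [if_neg hc]
        have hadd : PySem.Set.add visited current = visited ++ [current] :=
          PySem.Set.add_of_not_mem hc
        set v' := PySem.Set.add visited current with hv'
        set deps := rev.getD current PySem.Set.empty with hdeps
        set ns := deps.foldl (fun st dep => if dep ∈ v' then st else dep :: st) rest with hns
        rw [hstep]
        have hmemv' : ∀ x, x ∈ v' ↔ x ∈ visited ∨ x = current := by
          intro x; exact PySem.Set.mem_add _ _ _
        have hN' : v'.Nodup := PySem.Set.nodup_add _ _ hN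
        have hlenv' : v'.length = visited.length + 1 := by
          rw [hadd]; simp
        have hVU' : ∀ v ∈ v', v ∈ U := by
          intro v hv; rcases (hmemv' v).mp hv with h | rfl
          · exact hVU v h
          · exact hcU
        have hvle : v'.length ≤ U.length := pvNodupSubsetLen _ _ hN' hVU'
        have hSU' : ∀ s ∈ ns, s ∈ U := by
          intro s hs
          rcases (pvMemPush v' deps rest s).mp hs with ⟨h1, _⟩ | h
          · exact hrevU current s h1
          · exact hSU s (List.mem_cons_of_mem _ h)
        have hPV' : ∀ v ∈ v', P v := by
          intro v hv; rcases (hmemv' v).mp hv with h | rfl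
          · exact hPV v h
          · exact hPc
        have hPS' : ∀ s ∈ ns, P s := by
          intro s hs
          rcases (pvMemPush v' deps rest s).mp hs with ⟨h1, _⟩ | h
          · exact hclosed current s hPc h1
          · exact hPS s (List.mem_cons_of_mem _ h)
        have hI3' : ∀ v ∈ v', ∀ w ∈ rev.getD v PySem.Set.empty, w ∈ v' ∨ w ∈ ns := by
          intro v hv w hw
          rcases (hmemv' v).mp hv with h | rfl
          · rcases hI3 v h w hw with h2 | h2
            · exact Or.inl ((hmemv' w).mpr (Or.inl h2))
            · rcases List.mem_cons.mp h2 with rfl | h2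
              · exact Or.inl ((hmemv' w).mpr (Or.inr rfl))
              · exact Or.inr ((pvMemPush v' deps rest w).mpr (Or.inr h2))
          · by_cases hwv : w ∈ v'
            · exact Or.inl hwv
            · exact Or.inr ((pvMemPush v' deps rest w).mpr (Or.inl ⟨hw, hwv⟩))
        have hM' : (U.length - v'.length) * (U.length + 1) + ns.length ≤ n := by
          have hnsl : ns.length ≤ deps.length + rest.length := pvLenPush v' deps rest
          have hdl : deps.length ≤ U.length :=
            pvNodupSubsetLen _ _ (hrevN current) (fun y hy => hrevU current y hy)
          have ha : 1 ≤ U.length - visited.length := by omega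
          have hsub : U.length - v'.length = (U.length - visited.length) - 1 := by omega
          rw [hsub, Nat.sub_one_mul]
          set a := U.length - visited.length with hha
          have hge : U.length + 1 ≤ a * (U.length + 1) := by
            calc U.length + 1 = 1 * (U.length + 1) := by ring
              _ ≤ a * (U.length + 1) := Nat.mul_le_mul_right _ ha
          set M := a * (U.length + 1) with hM2
          simp only [List.length_cons] at hM
          omega
        have h := ih v' ns hN' hVU' hSU' hPV' hPS' hI3' hM'
        refine ⟨h.1, ?_, h.2.2.1, h.2.2.2⟩
        rintro x (hx | hx)
        · exact h.2.1 x (Or.inl ((hmemv' x).mpr (Or.inl hx)))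
        · rcases List.mem_cons.mp hx with rfl | hx
          · exact h.2.1 x (Or.inl ((hmemv' x).mpr (Or.inr rfl)))
          · exact h.2.1 x (Or.inr ((pvMemPush v' deps rest x).mpr (Or.inr hx)))

-- invariants of one 'for f, deps in graph.items()' pass of B (all at once, by one fold induction):
-- monotonicity, Nodup, growth only by keys, changed-flag monotone, a changed=false pass is the
-- identity and certifies closure, soundness for a step-closed P, and strict growth when changed
theorem pvPass_master (graph : List (String × List String)) (P : String → Prop)
    (hPstep : ∀ f deps d, (f, deps) ∈ graph → d ∈ deps → P d → P f) :
    ∀ (l : List (String × List String)), (∀ p ∈ l, p ∈ graph) →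
    ∀ (acc : PySem.Set String × Bool),
    (∀ x ∈ acc.1, x ∈ (l.foldl (fun acc fd =>
        if !PySem.Set.contains acc.1 fd.1 && fd.2.any (fun d => PySem.Set.contains acc.1 d) then
          (PySem.Set.add acc.1 fd.1, true) else acc) acc).1) ∧
    (acc.1.Nodup → (l.foldl (fun acc fd =>
        if !PySem.Set.contains acc.1 fd.1 && fd.2.any (fun d => PySem.Set.contains acc.1 d) then
          (PySem.Set.add acc.1 fd.1, true) else acc) acc).1.Nodup) ∧
    (∀ x ∈ (l.foldl (fun acc fd =>
        if !PySem.Set.contains acc.1 fd.1 && fd.2.any (fun d => PySem.Set.contains acc.1 d) then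
          (PySem.Set.add acc.1 fd.1, true) else acc) acc).1, x ∈ acc.1 ∨ x ∈ l.map Prod.fst) ∧
    (acc.2 = true → (l.foldl (fun acc fd =>
        if !PySem.Set.contains acc.1 fd.1 && fd.2.any (fun d => PySem.Set.contains acc.1 d) then
          (PySem.Set.add acc.1 fd.1, true) else acc) acc).2 = true) ∧
    ((l.foldl (fun acc fd =>
        if !PySem.Set.contains acc.1 fd.1 && fd.2.any (fun d => PySem.Set.contains acc.1 d) then
          (PySem.Set.add acc.1 fd.1, true) else acc) acc).2 = false →
      (l.foldl (fun acc fd =>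
        if !PySem.Set.contains acc.1 fd.1 && fd.2.any (fun d => PySem.Set.contains acc.1 d) then
          (PySem.Set.add acc.1 fd.1, true) else acc) acc).1 = acc.1 ∧
      (∀ fd ∈ l, fd.1 ∈ acc.1 ∨ ∀ d ∈ fd.2, d ∉ acc.1)) ∧
    ((∀ x ∈ acc.1, P x) → ∀ x ∈ (l.foldl (fun acc fd =>
        if !PySem.Set.contains acc.1 fd.1 && fd.2.any (fun d => PySem.Set.contains acc.1 d) then
          (PySem.Set.add acc.1 fd.1, true) else acc) acc).1, P x) ∧
    (acc.1.length ≤ (l.foldl (fun acc fd =>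
        if !PySem.Set.contains acc.1 fd.1 && fd.2.any (fun d => PySem.Set.contains acc.1 d) then
          (PySem.Set.add acc.1 fd.1, true) else acc) acc).1.length ∧
      (acc.2 = false → (l.foldl (fun acc fd =>
        if !PySem.Set.contains acc.1 fd.1 && fd.2.any (fun d => PySem.Set.contains acc.1 d) then
          (PySem.Set.add acc.1 fd.1, true) else acc) acc).2 = true →
        acc.1.length < (l.foldl (fun acc fd =>
        if !PySem.Set.contains acc.1 fd.1 && fd.2.any (fun d => PySem.Set.contains acc.1 d) then
          (PySem.Set.add acc.1 fd.1, true) else acc) acc).1.length)) := by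
  intro l
  induction l with
  | nil =>
    intro _ acc
    refine ⟨fun x hx => hx, fun h => h, fun x hx => Or.inl hx, fun h => h,
      fun _ => ⟨rfl, by simp⟩, fun h => h, le_refl _, ?_⟩
    intro h1 h2
    simp only [List.foldl_nil] at h2
    rw [h1] at h2; cases h2
  | cons hd tl ih =>
    intro hl acc
    simp only [List.foldl_cons]
    by_cases hcond : (!PySem.Set.contains acc.1 hd.1
        && hd.2.any (fun d => PySem.Set.contains acc.1 d)) = true
    · rw [if_pos hcond]
      have hcm : hd.1 ∉ acc.1 ∧ ∃ d ∈ hd.2, d ∈ acc.1 := by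
        rw [Bool.and_eq_true, Bool.not_eq_true'] at hcond
        constructor
        · intro hmem
          have := (PySem.Set.contains_iff acc.1 hd.1).mpr hmem
          rw [hcond.1] at this; cases this
        · obtain ⟨d, hd1, hd2⟩ := List.any_eq_true.mp hcond.2
          exact ⟨d, hd1, (PySem.Set.contains_iff _ _).mp hd2⟩
      have hadd : PySem.Set.add acc.1 hd.1 = acc.1 ++ [hd.1] :=
        PySem.Set.add_of_not_mem hcm.1
      obtain ⟨a, b, c, d, e, f, g⟩ := ih (fun p hp => hl p (List.mem_cons_of_mem _ hp))
        (PySem.Set.add acc.1 hd.1, true)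
      refine ⟨?_, ?_, ?_, fun _ => d rfl, ?_, ?_, ?_⟩
      · intro x hx
        exact a x ((PySem.Set.mem_add _ _ _).mpr (Or.inl hx))
      · intro hN
        exact b (PySem.Set.nodup_add _ _ hN)
      · intro x hx
        rcases c x hx with h | h
        · rcases (PySem.Set.mem_add _ _ _).mp h with h | rfl
          · exact Or.inl h
          · exact Or.inr (by simp)
        · exact Or.inr (by simp [h])
      · intro hfalse
        rw [d rfl] at hfalse; cases hfalse
      · intro hP x hx
        refine f ?_ x hx
        intro y hy
        rcases (PySem.Set.mem_add _ _ _).mp hy with h | rfl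
        · exact hP y h
        · obtain ⟨dd, hdd1, hdd2⟩ := hcm.2
          exact hPstep hd.1 hd.2 dd (hl hd List.mem_cons_self) hdd1 (hP dd hdd2)
      · have hlen : (PySem.Set.add acc.1 hd.1).length = acc.1.length + 1 := by
          rw [hadd]; simp
        have hlen2 : ((PySem.Set.add acc.1 hd.1, true) : PySem.Set String × Bool).1.length
            = acc.1.length + 1 := hlen
        refine ⟨?_, fun _ _ => ?_⟩
        · have := g.1; omega
        · have := g.1; omega
    · rw [if_neg hcond]
      obtain ⟨a, b, c, d, e, f, g⟩ := ih (fun p hp => hl p (List.mem_cons_of_mem _ hp)) acc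
      refine ⟨a, b, fun x hx => ?_, d, ?_, f, g⟩
      · rcases c x hx with h | h
        · exact Or.inl h
        · exact Or.inr (by simp [h])
      · intro hfalse
        obtain ⟨h1, h2⟩ := e hfalse
        refine ⟨h1, ?_⟩
        intro fd hfd
        rcases List.mem_cons.mp hfd with rfl | hfd
        · rw [Bool.and_eq_true] at hcond
          push Not at hcond
          by_cases hmem : fd.1 ∈ acc.1
          · exact Or.inl hmem
          · right
            intro dd hdd hddm
            have hc1 : (!PySem.Set.contains acc.1 fd.1) = true := by
              rw [Bool.not_eq_true']
              rw [← Bool.not_eq_true]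
              intro hcontra
              exact hmem ((PySem.Set.contains_iff _ _).mp hcontra)
            exact hcond hc1 (List.any_eq_true.mpr
              ⟨dd, hdd, (PySem.Set.contains_iff _ _).mpr hddm⟩)
        · exact h2 fd hfd

-- invariants of B's 'while changed:' loop: the fixpoint is Nodup, contains r, is sound for
-- a step-closed P, and is closed under one forward step
theorem pvFix_master (graph : List (String × List String)) (U : List String)
    (hkeys : ∀ k ∈ graph.map Prod.fst, k ∈ U)
    (P : String → Prop)
    (hPstep : ∀ f deps d, (f, deps) ∈ graph → d ∈ deps → P d → P f) :
    ∀ (fuel : Nat) (r : PySem.Set String),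
      r.Nodup → (∀ x ∈ r, x ∈ U) → (∀ x ∈ r, P x) →
      U.length + 1 ≤ fuel + r.length →
      (pvFix graph fuel r).Nodup ∧
      (∀ x ∈ r, x ∈ pvFix graph fuel r) ∧
      (∀ x ∈ pvFix graph fuel r, P x) ∧
      (∀ fd ∈ graph, (∃ d ∈ fd.2, d ∈ pvFix graph fuel r) → fd.1 ∈ pvFix graph fuel r) := by
  intro fuel
  induction fuel with
  | zero =>
    intro r hN hU _ hM
    have := pvNodupSubsetLen r U hN hU
    omega
  | succ n ih =>
    intro r hN hU hP hM
    obtain ⟨a, b, c, d, e, f, g⟩ :=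
      pvPass_master graph P hPstep graph (fun p hp => hp) (r, false)
    by_cases hch : (pvPass graph r).2 = true
    · have hstep : pvFix graph (n+1) r = pvFix graph n (pvPass graph r).1 := by
        simp only [pvFix, hch, if_true]
      rw [hstep]
      have hN' : (pvPass graph r).1.Nodup := b hN
      have hU' : ∀ x ∈ (pvPass graph r).1, x ∈ U := by
        intro x hx
        rcases c x hx with h | h
        · exact hU x h
        · exact hkeys x h
      have hP' : ∀ x ∈ (pvPass graph r).1, P x := f hP
      have hlt : r.length < (pvPass graph r).1.length := g.2 rfl hch
      obtain ⟨a', b', c', d'⟩ := ih (pvPass graph r).1 hN' hU' hP' (by omega)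
      exact ⟨a', fun x hx => b' x (a x hx), c', d'⟩
    · rw [Bool.not_eq_true] at hch
      have hstep : pvFix graph (n+1) r = (pvPass graph r).1 := by
        simp only [pvFix, hch, Bool.false_eq_true, if_false]
      rw [hstep]
      obtain ⟨h1, h2⟩ := e hch
      rw [show (pvPass graph r).1 = r from h1]
      refine ⟨hN, fun x hx => hx, hP, ?_⟩
      intro fd hfd hex
      rcases h2 fd hfd with h | h
      · exact h
      · obtain ⟨dd, hdd1, hdd2⟩ := hex
        exact absurd hdd2 (h dd hdd1)

-- membership in the reverse graph A builds, from an empty start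
theorem pvRevChar (graph : List (String × List String)) (x y : String) :
    y ∈ (pvBuildReverse graph).getD x PySem.Set.empty
      ↔ ∃ deps, (y, deps) ∈ graph ∧ x ∈ deps := by
  rw [show pvBuildReverse graph = graph.foldl (fun rev fd => fd.2.foldl (fun rev dep => rev.insert dep (PySem.Set.add (rev.getD dep PySem.Set.empty) fd.1)) rev) PySem.Dict.empty from rfl,
      pvRevGetD]
  simp [PySem.Dict.getD_empty, PySem.Set.empty]

theorem pvRevCharNodup (graph : List (String × List String)) (x : String) :
    ((pvBuildReverse graph).getD x PySem.Set.empty).Nodup := by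
  exact pvRevNodup graph PySem.Dict.empty (fun z => by simp [PySem.Dict.getD_empty]) x

-- A's visited set is exactly the pvReach set
theorem pvA_char (field : String) (graph : List (String × List String)) :
    (pvDfs (pvBuildReverse graph)
        (((PySem.Set.ofList (field :: graph.map Prod.fst)).length + 1)
          * ((PySem.Set.ofList (field :: graph.map Prod.fst)).length + 1))
        PySem.Set.empty [field]).Nodup ∧
    (∀ x, x ∈ pvDfs (pvBuildReverse graph)
        (((PySem.Set.ofList (field :: graph.map Prod.fst)).length + 1)
          * ((PySem.Set.ofList (field :: graph.map Prod.fst)).length + 1))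
        PySem.Set.empty [field]
      ↔ pvReach graph field x) := by
  have hrevU : ∀ x y, y ∈ (pvBuildReverse graph).getD x PySem.Set.empty
      → y ∈ PySem.Set.ofList (field :: graph.map Prod.fst) := by
    intro x y hy
    obtain ⟨deps, hm, _⟩ := (pvRevChar graph x y).mp hy
    exact (PySem.Set.mem_ofList _ _).mpr
      (List.mem_cons_of_mem _ (List.mem_map.mpr ⟨(y, deps), hm, rfl⟩))
  have hclosed : ∀ c w, pvReach graph field c
      → w ∈ (pvBuildReverse graph).getD c PySem.Set.empty → pvReach graph field w := by
    intro c w hc hw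
    obtain ⟨deps, hm, hcd⟩ := (pvRevChar graph c w).mp hw
    exact pvReach.step hc hm hcd
  have hfU : field ∈ PySem.Set.ofList (field :: graph.map Prod.fst) :=
    (PySem.Set.mem_ofList _ _).mpr List.mem_cons_self
  have hsq : ((PySem.Set.ofList (field :: graph.map Prod.fst)).length - ([] : List String).length)
        * ((PySem.Set.ofList (field :: graph.map Prod.fst)).length + 1) + [field].length
      ≤ ((PySem.Set.ofList (field :: graph.map Prod.fst)).length + 1)
        * ((PySem.Set.ofList (field :: graph.map Prod.fst)).length + 1) := by
    set L := (PySem.Set.ofList (field :: graph.map Prod.fst)).length with hL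
    have : (L + 1) * (L + 1) = L * (L + 1) + (L + 1) := by ring
    simp only [List.length_nil, List.length_cons, Nat.sub_zero]
    omega
  obtain ⟨hN, habs, hsound, hclo⟩ := pvDfs_master (pvBuildReverse graph)
    (PySem.Set.ofList (field :: graph.map Prod.fst)) hrevU (pvRevCharNodup graph)
    (pvReach graph field) hclosed
    (((PySem.Set.ofList (field :: graph.map Prod.fst)).length + 1)
      * ((PySem.Set.ofList (field :: graph.map Prod.fst)).length + 1))
    PySem.Set.empty [field]
    (by simp [PySem.Set.empty]) (by simp [PySem.Set.empty]) 
    (by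
      intro s hs
      rcases List.mem_cons.mp hs with rfl | h
      · exact hfU
      · simp at h)
    (by simp [PySem.Set.empty])
    (by
      intro s hs
      rcases List.mem_cons.mp hs with rfl | h
      · exact pvReach.base
      · simp at h)
    (by simp [PySem.Set.empty])
    hsq
  refine ⟨hN, fun x => ⟨hsound x, ?_⟩⟩
  intro hx
  induction hx with
  | base => exact habs field (Or.inr List.mem_cons_self)
  | step hr hm hd ihr =>
    exact hclo _ ihr _ ((pvRevChar graph _ _).mpr ⟨_, hm, hd⟩)

-- B's reachable set is exactly the pvReach set
theorem pvB_char (field : String) (graph : List (String × List String)) :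
    (pvFix graph (graph.length + 1) (PySem.Set.ofList [field])).Nodup ∧
    (∀ x, x ∈ pvFix graph (graph.length + 1) (PySem.Set.ofList [field])
      ↔ pvReach graph field x) := by
  have hstep : ∀ f deps d, (f, deps) ∈ graph → d ∈ deps
      → pvReach graph field d → pvReach graph field f := by
    intro f deps d hm hd hr
    exact pvReach.step hr hm hd
  have hkeys : ∀ k ∈ graph.map Prod.fst, k ∈ field :: graph.map Prod.fst :=
    fun k hk => List.mem_cons_of_mem _ hk
  have hof : PySem.Set.ofList [field] = [field] := rfl
  obtain ⟨hN, habs, hsound, hclo⟩ := pvFix_master graph (field :: graph.map Prod.fst)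
    hkeys (pvReach graph field) hstep (graph.length + 1) (PySem.Set.ofList [field])
    (by rw [hof]; simp)
    (by rw [hof]; intro x hx; rcases List.mem_cons.mp hx with rfl | h
        · exact List.mem_cons_self
        · simp at h)
    (by rw [hof]; intro x hx; rcases List.mem_cons.mp hx with rfl | h
        · exact pvReach.base
        · simp at h)
    (by rw [hof]; simp)
  refine ⟨hN, fun x => ⟨hsound x, ?_⟩⟩
  intro hx
  induction hx with
  | base => exact habs field (by rw [hof]; exact List.mem_cons_self)
  | step hr hm hd ihr =>
    exact hclo _ hm ⟨_, hd, ihr⟩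

-- ===== VERDICT (by name: the statement is the Claim_ definition above) =====
theorem get_transitive_dependents_py_spec : Claim_equal_get_transitive_dependents_py := by
  intro field graph _
  unfold Spec_get_transitive_dependents_py
  obtain ⟨hAN, hA⟩ := pvA_char field graph
  obtain ⟨hBN, hB⟩ := pvB_char field graph
  simp only [get_transitive_dependents_py, get_transitive_dependents_py_alt]
  apply PySem.List.sorted_eq_sorted_of_perm _ _ _ (fun a b h => h)
  refine (List.perm_ext_iff_of_nodup ?_ ?_).mpr ?_
  · exact PySem.Set.nodup_discard _ _ hAN
  · exact PySem.Set.nodup_diff _ _ hBN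
  · intro a
    rw [PySem.Set.mem_discard, PySem.Set.mem_diff, hA, hB]
    constructor
    · rintro ⟨h1, h2⟩
      exact ⟨h1, by simpa using h2⟩
    · rintro ⟨h1, h2⟩
      exact ⟨h1, by simpa using h2⟩
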